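-- pv_equiv track=rewrite | github.com/rk22sm/AI_agent_Auto | lib/documentation_auto_generator.py | _generate_agent_responsibilities
-- ===== SOURCE A (Python) =====
-- from typing import Dict, List, Optional, Tuple
--
-- def _generate_agent_responsibilities(agent_name: str, patterns: List[Dict]) -> str:
--     """Generate agent responsibilities section"""
--     responsibilities = []
--
--     # Extract responsibilities from patterns
--     task_descriptions = [p.get("task_description", "") for p in patterns]
--
--     # Categorize responsibilities
--     resp_categories = {
--         "analysis": ["analyze", "review", "examine", "audit"],
--         "execution": ["execute", "implement", "create", "build"],
--         "validation": ["validate", "check", "verify", "ensure"],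
--         "optimization": ["optimize", "improve", "enhance", "refactor"],
--     }
--
--     for category, keywords in resp_categories.items():
--         relevant_tasks = [desc for desc in task_descriptions if any(keyword in desc.lower() for keyword in keywords)]
--         if relevant_tasks:
--             responsibilities.append(f"**{category.title()}**: {len(relevant_tasks)} specialized tasks")
--
--     return "\n\n".join(responsibilities) if responsibilities else "Autonomous execution across multiple task domains."
-- ===== SOURCE B (Python) =====
-- from typing import Dict, List
--
--
-- def _generate_agent_responsibilities(agent_name: str, patterns: List[Dict]) -> str:
--     """Generate agent responsibilities section.
--
--     Different approach: a flat keyword -> bit-index table maps every keyword to its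
--     category's bit; each description is reduced to one integer bitmask, and the
--     per-category counts are per-bit popcounts over the mask list.  Bit i of a mask
--     is set exactly when some keyword of category i occurs in the lowercased
--     description, so each count equals A's len() of its filtered list.
--     """
--     categories = ["analysis", "execution", "validation", "optimization"]
--     keyword_bit = {
--         "analyze": 1, "review": 1, "examine": 1, "audit": 1,
--         "execute": 2, "implement": 2, "create": 2, "build": 2,
--         "validate": 4, "check": 4, "verify": 4, "ensure": 4,
--         "optimize": 8, "improve": 8, "enhance": 8, "refactor": 8,
--     }
--     masks = []
--     for p in patterns:
--         lowered = p.get("task_description", "").lower()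
--         mask = 0
--         for keyword, bit in keyword_bit.items():
--             if keyword in lowered:
--                 mask |= bit
--         masks.append(mask)
--     lines = []
--     for i, category in enumerate(categories):
--         count = sum((mask >> i) & 1 for mask in masks)
--         if count:
--             lines.append(f"**{category.title()}**: {count} specialized tasks")
--     return "\n\n".join(lines) if lines else "Autonomous execution across multiple task domains."
-- ===== Notes on version B (the rewrite author's own statement) =====
-- stated objective: alternative
-- what changed: B inverts the data structure: a flat keyword->bit table reduces each description to a single category bitmask in one pass, and the four counts are per-bit popcounts over the mask list, instead of A's four per-category filtered-list passes over the descriptions.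
import Mathlib
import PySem

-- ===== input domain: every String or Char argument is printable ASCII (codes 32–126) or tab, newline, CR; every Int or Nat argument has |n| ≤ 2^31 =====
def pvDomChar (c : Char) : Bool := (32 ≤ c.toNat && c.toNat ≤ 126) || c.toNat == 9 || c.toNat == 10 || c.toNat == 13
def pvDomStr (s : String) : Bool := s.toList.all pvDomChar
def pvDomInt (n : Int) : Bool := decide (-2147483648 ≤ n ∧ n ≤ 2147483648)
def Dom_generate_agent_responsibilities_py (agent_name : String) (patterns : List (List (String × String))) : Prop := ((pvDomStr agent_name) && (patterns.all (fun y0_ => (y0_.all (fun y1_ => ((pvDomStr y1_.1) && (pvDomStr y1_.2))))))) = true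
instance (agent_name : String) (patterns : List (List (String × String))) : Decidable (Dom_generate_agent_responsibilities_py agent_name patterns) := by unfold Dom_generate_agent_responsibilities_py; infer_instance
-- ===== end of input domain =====

-- B maps every keyword to a category bit, reduces each description to one bitmask in a single
-- pass, and obtains the four counts as per-bit popcounts over the mask list; A instead runs
-- four per-category filter passes over the description list. Same output.

-- Python str.title(), exact on ASCII (only applied to the ASCII category names); shared helper
def pyTitleGo : List Char → Bool → List Char
  | [], _ => []
  | c :: cs, prevAlpha =>
      (if PySem.Chars.isalpha c then (if prevAlpha then PySem.Chars.lowerChar c else PySem.Chars.upperChar c) else c)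
        :: pyTitleGo cs (PySem.Chars.isalpha c)

def pyTitle (s : String) : String := String.ofList (pyTitleGo s.toList false)

-- ===== PORT A =====
def respCategories : List (String × List String) :=
  [("analysis", ["analyze", "review", "examine", "audit"]),
   ("execution", ["execute", "implement", "create", "build"]),
   ("validation", ["validate", "check", "verify", "ensure"]),
   ("optimization", ["optimize", "improve", "enhance", "refactor"])]

def generate_agent_responsibilities_py (agent_name : String) (patterns : List (List (String × String))) : String :=
  let task_descriptions := patterns.map (fun p => ((List.lookup "task_description" p).getD ""))
  let responsibilities := respCategories.foldl
    (fun acc ck =>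
      let relevant_tasks := task_descriptions.filter
        (fun desc => ck.2.any (fun keyword => PySem.Str.isIn keyword (PySem.Str.lower desc)))
      if relevant_tasks ≠ [] then
        acc ++ [("**" ++ pyTitle ck.1 ++ "**: ") ++ PySem.Int.toStr (relevant_tasks.length : Int) ++ " specialized tasks"]
      else acc)
    []
  if responsibilities.isEmpty then "Autonomous execution across multiple task domains."
  else PySem.Str.join "\n\n" responsibilities

-- ===== PORT B =====
def keywordBits : List (String × Nat) :=
  [("analyze", 1), ("review", 1), ("examine", 1), ("audit", 1),
   ("execute", 2), ("implement", 2), ("create", 2), ("build", 2),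
   ("validate", 4), ("check", 4), ("verify", 4), ("ensure", 4),
   ("optimize", 8), ("improve", 8), ("enhance", 8), ("refactor", 8)]

def maskOf (p : List (String × String)) : Nat :=
  let lowered := PySem.Str.lower ((List.lookup "task_description" p).getD "")
  keywordBits.foldl (fun mask kb => if PySem.Str.isIn kb.1 lowered then mask ||| kb.2 else mask) 0

def generate_agent_responsibilities_py_alt (agent_name : String) (patterns : List (List (String × String))) : String :=
  let masks := patterns.map maskOf
  let lines := [(0, "analysis"), (1, "execution"), (2, "validation"), (3, "optimization")].foldl
    (fun (acc : List String) (ic : Nat × String) =>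
      let count := (masks.map (fun mask => (mask >>> ic.1) &&& 1)).sum
      if count ≠ 0 then
        acc ++ [("**" ++ pyTitle ic.2 ++ "**: ") ++ PySem.Int.toStr (count : Int) ++ " specialized tasks"]
      else acc)
    []
  if lines.isEmpty then "Autonomous execution across multiple task domains."
  else PySem.Str.join "\n\n" lines

-- ===== PRECONDITION & SPEC =====
def Spec_generate_agent_responsibilities_py (agent_name : String) (patterns : List (List (String × String))) (out : String) : Prop := out = generate_agent_responsibilities_py_alt agent_name patterns
instance (agent_name : String) (patterns : List (List (String × String))) (out : String) : Decidable (Spec_generate_agent_responsibilities_py agent_name patterns out) := by unfold Spec_generate_agent_responsibilities_py; infer_instance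

-- ===== CLAIM (what is proved, stated in full; the proofs are below) =====
def Claim_equal_generate_agent_responsibilities_py : Prop := ∀ (agent_name : String) (patterns : List (List (String × String))), Dom_generate_agent_responsibilities_py agent_name patterns → Spec_generate_agent_responsibilities_py agent_name patterns (generate_agent_responsibilities_py agent_name patterns)

-- ===== LEMMAS AND PROOFS =====

-- A's match predicate for category i, on a pattern directly
def pvMatch (kws : List String) (p : List (String × String)) : Bool :=
  kws.any (fun keyword => PySem.Str.isIn keyword (PySem.Str.lower ((List.lookup "task_description" p).getD "")))

-- folding a keyword group whose bits are all `bit` ORs `bit` in iff some keyword matches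
theorem pvFoldGroup (low : String) (bit : Nat) (kws : List (String × Nat)) (acc : Nat)
    (h : ∀ kb ∈ kws, kb.2 = bit) :
    kws.foldl (fun mask kb => if PySem.Str.isIn kb.1 low then mask ||| kb.2 else mask) acc
      = if kws.any (fun kb => PySem.Str.isIn kb.1 low) then acc ||| bit else acc := by
  induction kws generalizing acc with
  | nil => simp
  | cons kb t ih =>
      have hb : kb.2 = bit := h kb (by simp)
      have ht : ∀ x ∈ t, x.2 = bit := fun x hx => h x (by simp [hx])
      rw [List.foldl_cons, List.any_cons]
      by_cases hm : PySem.Str.isIn kb.1 low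
      · rw [if_pos hm, hb, ih (acc ||| bit) ht, hm, Bool.true_or, if_pos rfl]
        split
        · rw [Nat.or_assoc, Nat.or_self]
        · rfl
      · have hm' : PySem.Str.isIn kb.1 low = false := by
          rwa [Bool.not_eq_true] at hm
        rw [if_neg hm, ih acc ht, hm', Bool.false_or]

-- the bitmask of a pattern, characterized by the four category predicates
theorem pvMaskOf (p : List (String × String)) :
    maskOf p =
      (let a1 := if pvMatch ["analyze", "review", "examine", "audit"] p then (0 : Nat) ||| 1 else 0
       let a2 := if pvMatch ["execute", "implement", "create", "build"] p then a1 ||| 2 else a1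
       let a3 := if pvMatch ["validate", "check", "verify", "ensure"] p then a2 ||| 4 else a2
       if pvMatch ["optimize", "improve", "enhance", "refactor"] p then a3 ||| 8 else a3) := by
  simp only [maskOf, keywordBits]
  rw [show ([("analyze",1),("review",1),("examine",1),("audit",1),
      ("execute",2),("implement",2),("create",2),("build",2),
      ("validate",4),("check",4),("verify",4),("ensure",4),
      ("optimize",8),("improve",8),("enhance",8),("refactor",8)] : List (String × Nat))
      = [("analyze",1),("review",1),("examine",1),("audit",1)]
      ++ [("execute",2),("implement",2),("create",2),("build",2)]
      ++ [("validate",4),("check",4),("verify",4),("ensure",4)]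
      ++ [("optimize",8),("improve",8),("enhance",8),("refactor",8)] from rfl]
  simp only [List.foldl_append]
  rw [pvFoldGroup _ 8 _ _ (by decide), pvFoldGroup _ 4 _ _ (by decide),
      pvFoldGroup _ 2 _ _ (by decide), pvFoldGroup _ 1 _ _ (by decide)]
  simp only [pvMatch, List.any_cons, List.any_nil, Bool.or_false]

-- bit i of the mask is the indicator of category i's predicate
theorem pvBit0 (p : List (String × String)) :
    (maskOf p >>> 0) &&& 1 = if pvMatch ["analyze", "review", "examine", "audit"] p then 1 else 0 := by
  simp only [pvMaskOf]; split_ifs <;> rfl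
theorem pvBit1 (p : List (String × String)) :
    (maskOf p >>> 1) &&& 1 = if pvMatch ["execute", "implement", "create", "build"] p then 1 else 0 := by
  simp only [pvMaskOf]; split_ifs <;> rfl
theorem pvBit2 (p : List (String × String)) :
    (maskOf p >>> 2) &&& 1 = if pvMatch ["validate", "check", "verify", "ensure"] p then 1 else 0 := by
  simp only [pvMaskOf]; split_ifs <;> rfl
theorem pvBit3 (p : List (String × String)) :
    (maskOf p >>> 3) &&& 1 = if pvMatch ["optimize", "improve", "enhance", "refactor"] p then 1 else 0 := by
  simp only [pvMaskOf]; split_ifs <;> rfl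

-- countP as a sum of indicators
theorem pvSumCount {α : Type} (l : List α) (f : α → Nat) (c : α → Bool)
    (h : ∀ x, f x = if c x then 1 else 0) :
    (l.map f).sum = l.countP c := by
  induction l with
  | nil => rfl
  | cons x t ih => simp [List.countP_cons, h x, ih]; split <;> simp [Nat.add_comm]

-- A's per-category filter length equals countP of the same predicate
theorem pvFilterLen (patterns : List (List (String × String))) (kws : List String) :
    ((patterns.map (fun p => ((List.lookup "task_description" p).getD ""))).filter
      (fun desc => kws.any (fun k => PySem.Str.isIn k (PySem.Str.lower desc)))).length
    = patterns.countP (pvMatch kws) := by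
  rw [List.filter_map, List.length_map, ← List.countP_eq_length_filter]
  exact List.countP_congr (fun p _ => by simp [Function.comp, pvMatch])

-- B's per-bit popcount equals countP of the corresponding predicate
theorem pvSum0 (patterns : List (List (String × String))) :
    (List.map ((fun mask => mask >>> 0 &&& 1) ∘ maskOf) patterns).sum
      = patterns.countP (pvMatch ["analyze", "review", "examine", "audit"]) :=
  pvSumCount patterns _ _ (fun p => by simpa [Function.comp] using pvBit0 p)
theorem pvSum1 (patterns : List (List (String × String))) :
    (List.map ((fun mask => mask >>> 1 &&& 1) ∘ maskOf) patterns).sum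
      = patterns.countP (pvMatch ["execute", "implement", "create", "build"]) :=
  pvSumCount patterns _ _ (fun p => by simpa [Function.comp] using pvBit1 p)
theorem pvSum2 (patterns : List (List (String × String))) :
    (List.map ((fun mask => mask >>> 2 &&& 1) ∘ maskOf) patterns).sum
      = patterns.countP (pvMatch ["validate", "check", "verify", "ensure"]) :=
  pvSumCount patterns _ _ (fun p => by simpa [Function.comp] using pvBit2 p)
theorem pvSum3 (patterns : List (List (String × String))) :
    (List.map ((fun mask => mask >>> 3 &&& 1) ∘ maskOf) patterns).sum
      = patterns.countP (pvMatch ["optimize", "improve", "enhance", "refactor"]) :=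
  pvSumCount patterns _ _ (fun p => by simpa [Function.comp] using pvBit3 p)

-- emptiness of A's filtered list, restated as nonzeroness of the count
theorem pvCondEq (patterns : List (List (String × String))) (kws : List String) :
    (((patterns.map (fun p => (List.lookup "task_description" p).getD "")).filter
      (fun desc => kws.any (fun k => PySem.Str.isIn k (PySem.Str.lower desc))) ≠ []))
    = ¬(patterns.countP (pvMatch kws) = 0) := by
  apply propext
  rw [ne_eq, ← List.length_eq_zero_iff, pvFilterLen patterns kws]

-- ===== VERDICT (by name: the statement is the Claim_ definition above) =====
theorem generate_agent_responsibilities_py_spec : Claim_equal_generate_agent_responsibilities_py := by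
  intro agent_name patterns _
  show generate_agent_responsibilities_py agent_name patterns = generate_agent_responsibilities_py_alt agent_name patterns
  unfold generate_agent_responsibilities_py generate_agent_responsibilities_py_alt respCategories
  simp only [List.foldl_cons, List.foldl_nil, List.map_map,
    pvSum0 patterns, pvSum1 patterns, pvSum2 patterns, pvSum3 patterns,
    pvFilterLen patterns, pvCondEq patterns]
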